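-- pv_equiv track=rewrite | github.com/sean-7777/CS102 | Week7/Discussion/listings.py | listing6
-- ===== SOURCE A (Python) =====
-- def listing6(n: int) -> int:
--     """Compute primes with listing 16.6"""
--
--     primes: list[int] = []
--
--     for i in range(n + 1):
--         primes.append(True)
--
--     k = 2
--     while k <= n / k:
--         if primes[k]:
--             for i in range(k, int(n / k) + 1):
--                 primes[k * i] = False
--         k += 1
--
--     return primes.count(True)
-- ===== SOURCE B (Python) =====
-- def listing6(n: int) -> int:
--     """Count the i up to n that have no divisor d with 2 <= d and d*d <= i (trial division; the unit indices pass the test just as they survive the sieve)."""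
--     count = 0
--     for i in range(n + 1):
--         d = 2
--         while d * d <= i and i % d:
--             d += 1
--         if d * d > i:
--             count += 1
--     return count
-- ===== Notes on version B (the rewrite author's own statement) =====
-- stated objective: simpler
-- what changed: Replaces the sieve (build a boolean table, cross off multiples of each k up to the square root, count surviving cells) with a single pass that trial-divides each candidate directly (no divisor d with d at least two and d*d at most the candidate), so no table is built; the two unit indices pass the divisor-free test just as they survive the sieve.
import Mathlib
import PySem

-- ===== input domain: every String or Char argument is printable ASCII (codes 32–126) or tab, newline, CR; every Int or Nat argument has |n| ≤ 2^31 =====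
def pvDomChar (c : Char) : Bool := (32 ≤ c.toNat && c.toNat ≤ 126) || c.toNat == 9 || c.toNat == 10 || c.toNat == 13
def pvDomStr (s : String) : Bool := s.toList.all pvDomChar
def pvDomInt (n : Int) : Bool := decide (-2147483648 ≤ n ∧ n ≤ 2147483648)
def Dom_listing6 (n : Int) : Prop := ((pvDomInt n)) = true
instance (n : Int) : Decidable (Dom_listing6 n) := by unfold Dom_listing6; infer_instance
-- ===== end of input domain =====

-- B replaces A's boolean sieve table with direct trial-division counting: no array, one count accumulator (simpler, not faster).

-- needed by the termination arguments of both ports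
theorem pv_le_mul_self (k : Int) : k ≤ k * k := by
  rcases (by omega : 1 ≤ k ∨ k ≤ 0) with h | h
  · nlinarith
  · nlinarith [mul_self_nonneg k]

-- ===== PORT A =====
-- Python's list is an array: `primes.append(True)` is `Array.push`, `primes[k*i] = False` is an
-- in-bounds element write (`setIfInBounds`; the index k*i is nonnegative and in range, so exact).
-- `for i in range(n + 1): primes.append(True)`
def listing6_init (n : Int) : Array Bool :=
  (PySem.List.pyRange 0 (n + 1) 1).foldl (fun acc _ => acc.push true) #[]

-- `for i in range(k, int(n / k) + 1): primes[k * i] = False`.  `int(n / k)` is exact as `n // k`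
-- here: in the loop 0 < k ≤ √n and 0 ≤ n ≤ 2^31, so the float `n / k` errs by < 2^-23 while the
-- nearest flip point is ≥ 1/k ≥ 2^-16 away; truncation = floor for a nonnegative quotient.
def listing6_mark (n k : Int) (arr : Array Bool) : Array Bool :=
  (PySem.List.pyRange k (PySem.Int.floordiv n k + 1) 1).foldl
    (fun a i => a.setIfInBounds (k * i).toNat false) arr

-- `while k <= n / k:` is exact as `k * k ≤ n` on |n| ≤ 2^31 (same float-error argument);
-- `primes[k]` is an in-range read (2 ≤ k ≤ n < len), ported as `getD`.
def listing6_loop (n k : Int) (arr : Array Bool) : Array Bool :=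
  if h : k * k ≤ n then
    listing6_loop n (k + 1) (if arr.getD k.toNat false = true then listing6_mark n k arr else arr)
  else arr
termination_by (n + 1 - k).toNat
decreasing_by
  have := pv_le_mul_self k
  omega

-- `return primes.count(True)`
def listing6 (n : Int) : Int :=
  ((listing6_loop n 2 (listing6_init n)).toList.count true : Int)

-- ===== PORT B =====
-- `d = 2; while d * d <= i and i % d: d += 1`
def trialLoop (i d : Int) : Int :=
  if h : d * d ≤ i ∧ PySem.Int.mod i d ≠ 0 then trialLoop i (d + 1) else d
termination_by (i + 1 - d).toNat
decreasing_by
  have := pv_le_mul_self d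
  omega

def listing6_alt (n : Int) : Int :=
  (PySem.List.pyRange 0 (n + 1) 1).foldl
    (fun count i =>
      let d := trialLoop i 2
      if i < d * d then count + 1 else count) 0

-- ===== PRECONDITION & SPEC =====
def Spec_listing6 (n : Int) (out : Int) : Prop := out = listing6_alt n
instance (n : Int) (out : Int) : Decidable (Spec_listing6 n out) := by unfold Spec_listing6; infer_instance

-- ===== CLAIM (what is proved, stated in full; the proofs are below) =====
def Claim_equal_listing6 : Prop := ∀ (n : Int), Dom_listing6 n → Spec_listing6 n (listing6 n)

-- ===== LEMMAS AND PROOFS =====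

-- List-level model of port A's sieve (the Array port is bridged to it via toList below)
-- `for i in range(n + 1): primes.append(True)`
def pvInit (n : Int) : List Bool :=
  (PySem.List.pyRange 0 (n + 1) 1).foldl (fun acc _ => acc ++ [true]) []

-- `for i in range(k, int(n / k) + 1): primes[k * i] = False`.  `int(n / k)` is exact as `n // k`
-- here: in the loop 0 < k ≤ √n and 0 ≤ n ≤ 2^31, so the float `n / k` errs by < 2^-23 while the
-- nearest flip point is ≥ 1/k ≥ 2^-16 away; truncation = floor for a nonnegative quotient.
-- The assigned index `k * i` is nonnegative and in range, so `List.set` at `(k*i).toNat` is exact.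
def pvMark (n k : Int) (arr : List Bool) : List Bool :=
  (PySem.List.pyRange k (PySem.Int.floordiv n k + 1) 1).foldl
    (fun a i => a.set (k * i).toNat false) arr

-- `while k <= n / k:` is exact as `k * k ≤ n` on |n| ≤ 2^31 (same float-error argument);
-- `primes[k]` is an in-range read (2 ≤ k ≤ n < len), ported as `getD`.
def pvLoop (n k : Int) (arr : List Bool) : List Bool :=
  if h : k * k ≤ n then
    pvLoop n (k + 1) (if arr.getD k.toNat false = true then pvMark n k arr else arr)
  else arr
termination_by (n + 1 - k).toNat
decreasing_by
  have := pv_le_mul_self k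
  omega

theorem arr_getD_toList (a : Array Bool) (i : Nat) (d : Bool) :
    a.getD i d = a.toList.getD i d := by
  rw [Array.getD, List.getD]
  split
  · next h => rw [List.getElem?_eq_getElem (by simpa using h)]; simp [Array.getElem_toList]
  · next h => rw [List.getElem?_eq_none (by simpa using (Nat.le_of_not_lt h))]; rfl

theorem push_foldl_toList (l : List Int) (acc : Array Bool) :
    (l.foldl (fun acc _ => acc.push true) acc).toList
      = l.foldl (fun acc _ => acc ++ [true]) acc.toList := by
  induction l generalizing acc with
  | nil => rfl
  | cons x xs ih => rw [List.foldl_cons, List.foldl_cons, ih, Array.toList_push]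

theorem init_toList (n : Int) : (listing6_init n).toList = pvInit n := by
  rw [listing6_init, pvInit, push_foldl_toList]

theorem set_foldl_toList (k : Int) (l : List Int) (acc : Array Bool) :
    (l.foldl (fun a i => a.setIfInBounds (k * i).toNat false) acc).toList
      = l.foldl (fun a i => a.set (k * i).toNat false) acc.toList := by
  induction l generalizing acc with
  | nil => rfl
  | cons x xs ih => rw [List.foldl_cons, List.foldl_cons, ih, Array.toList_setIfInBounds]

theorem mark_toList (n k : Int) (arr : Array Bool) :
    (listing6_mark n k arr).toList = pvMark n k arr.toList := by
  rw [listing6_mark, pvMark, set_foldl_toList]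

theorem loop_toList (n k : Int) (arr : Array Bool) :
    (listing6_loop n k arr).toList = pvLoop n k arr.toList := by
  rw [listing6_loop, pvLoop]
  by_cases hkn : k * k ≤ n
  · rw [dif_pos hkn, dif_pos hkn, loop_toList, arr_getD_toList]
    by_cases hc : arr.toList.getD k.toNat false = true
    · rw [if_pos hc, if_pos hc, mark_toList]
    · rw [if_neg hc, if_neg hc]
  · rw [dif_neg hkn, dif_neg hkn]
termination_by (n + 1 - k).toNat
decreasing_by
  have := pv_le_mul_self k
  omega

-- `HasSmallFac j`: j has a divisor d with 2 ≤ d and d*d ≤ j — exactly the numbers the sieve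
-- crosses off and the numbers B's trial loop rejects (so 0 and 1 count as "prime" in both).
def HasSmallFac (j : Int) : Prop := ∃ d : Int, 2 ≤ d ∧ d * d ≤ j ∧ d ∣ j

theorem trial_char (i : Int) (d : Int) (hd : 2 ≤ d)
    (hno : ∀ e : Int, 2 ≤ e → e < d → e * e ≤ i → ¬ e ∣ i) :
    (i < trialLoop i d * trialLoop i d ↔ ¬ HasSmallFac i) := by
  rw [trialLoop]
  split_ifs with h
  · have hno' : ∀ e : Int, 2 ≤ e → e < d + 1 → e * e ≤ i → ¬ e ∣ i := by
      intro e he helt hee hdvd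
      rcases (by omega : e < d ∨ e = d) with h' | rfl
      · exact hno e he h' hee hdvd
      · exact h.2 ((PySem.Int.mod_eq_zero_iff_dvd i e).mpr hdvd)
    exact trial_char i (d + 1) (by omega) hno'
  · by_cases hA : d * d ≤ i
    · have hmod : PySem.Int.mod i d = 0 := by tauto
      have hdvd : d ∣ i := (PySem.Int.mod_eq_zero_iff_dvd i d).mp hmod
      exact iff_of_false (by omega) (fun hn => hn ⟨d, hd, hA, hdvd⟩)
    · refine iff_of_true (by omega) (fun hP => ?_)
      obtain ⟨e, he2, hee, hdvd⟩ := hP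
      rcases (by omega : e < d ∨ d ≤ e) with h' | h'
      · exact hno e he2 h' hee hdvd
      · have : d * d ≤ e * e := by nlinarith
        omega
termination_by (i + 1 - d).toNat
decreasing_by
  have := pv_le_mul_self d
  omega

theorem foldl_set_length (k : Int) (l : List Int) (arr : List Bool) :
    (l.foldl (fun a i => a.set (k * i).toNat false) arr).length = arr.length := by
  induction l generalizing arr with
  | nil => rfl
  | cons x xs ih => simp [List.foldl, ih]

theorem foldl_set_getD (k a b : Int) (hk : 0 < k) (ha : 0 < a) (arr : List Bool)
    (hlen : ∀ i : Int, a ≤ i → i < b → (k * i).toNat < arr.length) (j : Nat) :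
    ((PySem.List.pyRange a b 1).foldl (fun A i => A.set (k * i).toNat false) arr).getD j false
      = if k ∣ (j : Int) ∧ k * a ≤ (j : Int) ∧ (j : Int) < k * b then false
        else arr.getD j false := by
  rcases (by omega : b ≤ a ∨ a < b) with hab | hab
  · rw [PySem.List.pyRange_one_eq_nil hab]
    simp only [List.foldl_nil]
    rw [if_neg]
    rintro ⟨-, h1, h2⟩
    nlinarith
  · rw [PySem.List.pyRange_one_cons hab, List.foldl_cons]
    have hlen' : ∀ i : Int, a + 1 ≤ i → i < b → (k * i).toNat < (arr.set (k * a).toNat false).length := by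
      intro i h1 h2
      rw [List.length_set]
      exact hlen i (by omega) h2
    rw [foldl_set_getD k (a + 1) b hk (by omega) _ hlen' j]
    have hka : 0 ≤ k * a := by positivity
    have hinr : (k * a).toNat < arr.length := hlen a le_rfl hab
    have hset : (arr.set (k * a).toNat false).getD j false
        = if (k * a).toNat = j then false else arr.getD j false := by
      by_cases hj : (k * a).toNat = j
      · subst hj
        simp [List.getD, hinr]
      · simp [List.getD, hj]
    rw [hset]
    split_ifs with h1 h2 h3 h4 h5 <;> try rfl
    · -- C₁ holds but C₀ fails: impossible since k*(a+1) ≥ k*a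
      exact absurd ⟨h1.1, le_trans (by nlinarith) h1.2.1, h1.2.2⟩ h2
    · -- j = k*a (as toNat) but C₀ fails: impossible
      have hja : (j : Int) = k * a := by omega
      exact absurd ⟨⟨a, hja⟩, le_of_eq hja.symm,
        hja ▸ mul_lt_mul_of_pos_left hab hk⟩ h4
    · -- C₀ holds, j ≠ k*a: then C₁ holds, contradicting ¬C₁
      obtain ⟨⟨t, ht⟩, hl, hr⟩ := h5
      exfalso
      apply h1
      refine ⟨⟨t, ht⟩, ?_, hr⟩
      have hat : a ≤ t := by
        by_contra hc
        have : k * t ≤ k * (a - 1) :=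
          mul_le_mul_of_nonneg_left (by omega) (le_of_lt hk)
        nlinarith
      have hta : t ≠ a := by
        rintro rfl
        exact h3 (by omega)
      calc k * (a + 1) ≤ k * t :=
            mul_le_mul_of_nonneg_left (by omega) (le_of_lt hk)
        _ = (j : Int) := ht.symm
termination_by (b - a).toNat
decreasing_by omega

theorem pvLoop_length (n k : Int) (arr : List Bool) :
    (pvLoop n k arr).length = arr.length := by
  rw [pvLoop]
  split_ifs with h hc
  · rw [pvLoop_length, pvMark]
    exact foldl_set_length k _ arr
  · exact pvLoop_length n (k + 1) arr
  · rfl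
termination_by (n + 1 - k).toNat
decreasing_by
  all_goals
    have := pv_le_mul_self k
    omega

theorem pvLoop_char (n : Int) (k : Int) (arr : List Bool) (hk : 2 ≤ k)
    (hlen : arr.length = (n + 1).toNat)
    (hinv : ∀ j : Nat, j < (n + 1).toNat →
      (arr.getD j false = false ↔ ∃ d : Int, 2 ≤ d ∧ d < k ∧ d * d ≤ (j : Int) ∧ d ∣ (j : Int)))
    (j : Nat) (hj : j < (n + 1).toNat) :
    ((pvLoop n k arr).getD j false = false ↔ HasSmallFac (j : Int)) := by
  rw [pvLoop]
  by_cases hkn : k * k ≤ n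
  case neg =>
    rw [dif_neg hkn]
    rw [hinv j hj]
    constructor
    · rintro ⟨d, hd1, hd2, hd3, hd4⟩
      exact ⟨d, hd1, hd3, hd4⟩
    · rintro ⟨d, hd1, hd3, hd4⟩
      refine ⟨d, hd1, ?_, hd3, hd4⟩
      by_contra hdk
      have : k * k ≤ d * d := by nlinarith
      omega
  rw [dif_pos hkn]
  · -- one more sieve round: establish the invariant for k + 1
    have hkk : k ≤ k * k := pv_le_mul_self k
    have hkm : k.toNat < (n + 1).toNat := by omega
    have hq : PySem.Int.floordiv n k * k ≤ n :=
      (PySem.Int.le_floordiv_iff_mul_le (by omega)).mp le_rfl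
    have hqk : k ≤ PySem.Int.floordiv n k :=
      (PySem.Int.le_floordiv_iff_mul_le (by omega)).mpr (by omega)
    set arr' := if arr.getD k.toNat false = true then pvMark n k arr else arr with harr'
    have hlen' : arr'.length = (n + 1).toNat := by
      rw [harr']
      by_cases hc : arr.getD k.toNat false = true
      · rw [if_pos hc, pvMark, foldl_set_length]
        exact hlen
      · rw [if_neg hc]
        exact hlen
    have hinv' : ∀ j : Nat, j < (n + 1).toNat →
        (arr'.getD j false = false ↔
          ∃ d : Int, 2 ≤ d ∧ d < k + 1 ∧ d * d ≤ (j : Int) ∧ d ∣ (j : Int)) := by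
      intro j hj
      by_cases hc : arr.getD k.toNat false = true
      · -- primes[k] is True: row k gets marked
        have hkP : ¬ ∃ d : Int, 2 ≤ d ∧ d < k ∧ d * d ≤ ((k.toNat : Nat) : Int) ∧ d ∣ ((k.toNat : Nat) : Int) := by
          intro hP
          have := (hinv k.toNat hkm).mpr hP
          rw [this] at hc
          exact absurd hc (by simp)
        rw [harr', if_pos hc, pvMark,
          foldl_set_getD k k (PySem.Int.floordiv n k + 1) (by omega) (by omega) arr
            (by
              intro i h1 h2
              have h3 : k * i ≤ k * PySem.Int.floordiv n k :=
                mul_le_mul_of_nonneg_left (by omega) (by omega)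
              have : k * PySem.Int.floordiv n k ≤ n := by
                rw [mul_comm] at h3 ⊢
                exact hq
              omega) j]
        by_cases hC : k ∣ (j : Int) ∧ k * k ≤ (j : Int) ∧ (j : Int) < k * (PySem.Int.floordiv n k + 1)
        · rw [if_pos hC]
          exact iff_of_true rfl ⟨k, by omega, by omega, hC.2.1, hC.1⟩
        · rw [if_neg hC, hinv j hj]
          constructor
          · rintro ⟨d, hd1, hd2, hd3, hd4⟩
            exact ⟨d, hd1, by omega, hd3, hd4⟩
          · rintro ⟨d, hd1, hd2, hd3, hd4⟩
            rcases (by omega : d < k ∨ d = k) with h' | heq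
            · exact ⟨d, hd1, h', hd3, hd4⟩
            · -- witness d = k would make the marking condition hold, contradiction
              subst heq
              exfalso
              apply hC
              obtain ⟨t, ht⟩ := hd4
              have hjn : (j : Int) ≤ n := by omega
              have htq : t ≤ PySem.Int.floordiv n d :=
                (PySem.Int.le_floordiv_iff_mul_le (by omega)).mpr
                  (by have hcomm : t * d = d * t := mul_comm t d; omega)
              refine ⟨⟨t, ht⟩, hd3, ?_⟩
              have h6 : d * t ≤ d * PySem.Int.floordiv n d :=
                mul_le_mul_of_nonneg_left htq (by omega)
              have h7 : d * (PySem.Int.floordiv n d + 1)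
                  = d * PySem.Int.floordiv n d + d := by ring
              omega
      · -- primes[k] is False: k itself has a small factor; nothing changes this round
        have hkQ : ∃ a : Int, 2 ≤ a ∧ a < k ∧ a * a ≤ ((k.toNat : Nat) : Int) ∧ a ∣ ((k.toNat : Nat) : Int) := by
          apply (hinv k.toNat hkm).mp
          revert hc
          cases arr.getD k.toNat false <;> simp
        rw [harr', if_neg hc, hinv j hj]
        constructor
        · rintro ⟨d, hd1, hd2, hd3, hd4⟩
          exact ⟨d, hd1, by omega, hd3, hd4⟩
        · rintro ⟨d, hd1, hd2, hd3, hd4⟩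
          rcases (by omega : d < k ∨ d = k) with h' | heq
          · exact ⟨d, hd1, h', hd3, hd4⟩
          · subst heq
            obtain ⟨a, ha1, ha2, ha3, ha4⟩ := hkQ
            have hkj : ((d.toNat : Nat) : Int) = d := by omega
            rw [hkj] at ha3 ha4
            refine ⟨a, ha1, by omega, ?_, dvd_trans ha4 hd4⟩
            calc a * a ≤ d := ha3
              _ ≤ d * d := pv_le_mul_self d
              _ ≤ (j : Int) := hd3
    exact pvLoop_char n (k + 1) arr' (by omega) hlen' hinv' j hj
termination_by (n + 1 - k).toNat
decreasing_by
  have := pv_le_mul_self k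
  omega

-- ===== VERDICT (by name: the statement is the Claim_ definition above) =====
theorem decide_trial_eq_false_iff (i : Int) :
    (decide (i < trialLoop i 2 * trialLoop i 2) = false) ↔ HasSmallFac i := by
  rw [decide_eq_false_iff_not, trial_char i 2 le_rfl (by intro e he1 he2; omega), not_not]

theorem listing6_spec : Claim_equal_listing6 := by
  intro n _
  unfold Spec_listing6
  have hrlen : (PySem.List.pyRange 0 (n + 1) 1).length = (n + 1).toNat := by
    rw [PySem.List.length_pyRange_one]
    omega
  have hinit : pvInit n = (PySem.List.pyRange 0 (n + 1) 1).map (fun _ => true) := by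
    rw [pvInit, PySem.List.foldl_append_singleton_eq_map, List.nil_append]
  have hlen0 : (pvInit n).length = (n + 1).toNat := by
    rw [hinit, List.length_map, hrlen]
  have hinv0 : ∀ j : Nat, j < (n + 1).toNat →
      ((pvInit n).getD j false = false ↔
        ∃ d : Int, 2 ≤ d ∧ d < 2 ∧ d * d ≤ (j : Int) ∧ d ∣ (j : Int)) := by
    intro j hj
    have hj' : j < (pvInit n).length := by omega
    rw [List.getD_eq_getElem _ _ hj']
    have : (pvInit n)[j]'hj' = true := by
      simp only [hinit, List.getElem_map]
    rw [this]
    exact iff_of_false (by simp) (by rintro ⟨d, hd1, hd2, -⟩; omega)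
  have hlenF : (pvLoop n 2 (pvInit n)).length = (n + 1).toNat := by
    rw [pvLoop_length, hlen0]
  have hchar : ∀ j : Nat, j < (n + 1).toNat →
      ((pvLoop n 2 (pvInit n)).getD j false = false ↔ HasSmallFac (j : Int)) :=
    fun j hj => pvLoop_char n 2 _ (by omega) hlen0 hinv0 j hj
  have harr_eq : pvLoop n 2 (pvInit n)
      = (PySem.List.pyRange 0 (n + 1) 1).map
          (fun i => decide (i < trialLoop i 2 * trialLoop i 2)) := by
    apply List.ext_getElem
    · rw [hlenF, List.length_map, hrlen]
    · intro j h1 h2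
      have hj : j < (n + 1).toNat := by omega
      rw [List.getElem_map, PySem.List.getElem_pyRange_one 0 (n + 1) j (by omega)]
      have e1 : ((pvLoop n 2 (pvInit n))[j]'h1 = false ↔ HasSmallFac (j : Int)) := by
        rw [← List.getD_eq_getElem _ false h1]
        exact hchar j hj
      rw [show ((0 : Int) + (j : Int)) = (j : Int) by omega]
      have e2 := decide_trial_eq_false_iff (j : Int)
      cases hb1 : (pvLoop n 2 (pvInit n))[j]'h1
      · exact (e2.mpr (e1.mp hb1)).symm
      · cases hb2 : decide ((j : Int) < trialLoop (j : Int) 2 * trialLoop (j : Int) 2)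
        · have hfalse := e1.mpr (e2.mp hb2)
          rw [hb1] at hfalse
          exact absurd hfalse (by simp)
        · rfl
  have hB : listing6_alt n
      = 0 + ((PySem.List.pyRange 0 (n + 1) 1).countP
          (fun i => decide (i < trialLoop i 2 * trialLoop i 2)) : Int) := by
    rw [listing6_alt]
    rw [show (fun (count : Int) (i : Int) =>
          let d := trialLoop i 2
          if i < d * d then count + 1 else count)
        = (fun (acc : Int) (x : Int) =>
          if (fun i => decide (i < trialLoop i 2 * trialLoop i 2)) x = true then acc + 1 else acc) by
      funext c i
      by_cases h : i < trialLoop i 2 * trialLoop i 2 <;> simp [h]]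
    exact PySem.List.foldl_count_if _ _ 0
  rw [listing6, loop_toList, init_toList, harr_eq, hB, List.count_eq_countP, List.countP_map]
  have hfun : ((fun (x : Bool) => x == true) ∘
        (fun i : Int => decide (i < trialLoop i 2 * trialLoop i 2)))
      = (fun i : Int => decide (i < trialLoop i 2 * trialLoop i 2)) := by
    funext i
    simp
  rw [hfun]
  omega
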